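-- pv_equiv track=rewrite | github.com/affanaslam/hello-world | ct1/programs/lab5.py | TableBinary_to_list
-- ===== SOURCE A (Python) =====
-- def TableBinary_to_list(Read):
--     '''Input = String with \\t and \\n in it (table of codes) \n output = List of the codes'''
--     Read=Read.replace('\t','%')
--     Read=Read.replace('\r\n','^')
--     dumy=[]
--     List=[]
--     for i in Read:
--         n=Read.find('^')
--         if i=='^':
--             dumy.append(Read[:n])
--             Read=Read[n+1:]
--     for i in dumy:
--         t=i.find('%')
--         if i[t]=='%':
--             List.append((i[:t],i[t+1:]))
--             dumy=dumy[1:]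
--     return List
-- ===== SOURCE B (Python) =====
-- def TableBinary_to_list(Read):
--     '''Single left-to-right pass over the normalized string: accumulate the
--     current segment in a buffer, finalize it at each '^', never building the
--     intermediate segment list and never re-scanning/re-slicing the remainder.'''
--     s = Read.replace('\t', '%').replace('\r\n', '^')
--     out = []
--     buf = ''
--     for c in s:
--         if c == '^':
--             k = buf.find('%')
--             if k != -1:
--                 out.append((buf[:k], buf[k + 1:]))
--             buf = ''
--         else:
--             buf = buf + c
--     return out
-- ===== Notes on version B (the rewrite author's own statement) =====
-- stated objective: faster
-- what changed: B replaces A's two passes (a loop that repeatedly find-and-slices a shrinking copy of the string to build a segment list, then a second loop over that list) with one left-to-right pass over the normalized string that accumulates the current segment in a buffer and finalizes it at each '^'.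
-- outside the precondition, e.g. on TableBinary_to_list('^'): A raises IndexError, B returns []; on TableBinary_to_list('^^'): A raises IndexError, B returns []
import Mathlib
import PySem

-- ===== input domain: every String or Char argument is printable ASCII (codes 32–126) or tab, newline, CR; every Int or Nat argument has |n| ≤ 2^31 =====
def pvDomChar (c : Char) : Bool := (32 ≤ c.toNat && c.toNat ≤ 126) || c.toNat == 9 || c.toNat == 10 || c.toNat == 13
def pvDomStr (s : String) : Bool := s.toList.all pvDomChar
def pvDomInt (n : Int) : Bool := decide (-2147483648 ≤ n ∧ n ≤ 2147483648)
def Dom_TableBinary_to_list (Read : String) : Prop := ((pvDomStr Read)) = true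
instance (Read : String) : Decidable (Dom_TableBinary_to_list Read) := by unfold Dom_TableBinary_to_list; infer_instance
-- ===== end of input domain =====

-- B does ONE pass with a buffer instead of A's build-segment-list-then-rescan two passes; faster (O(n) vs O(n^2)).

-- ===== PORT A =====
-- A's first loop: iterate the chars of the normalized string while find-and-slicing state cur.
def pvStepA1 (st : List (List Char) × List Char) (i : Char) : List (List Char) × List Char :=
  let n := PySem.Chars.find st.2 ['^']
  if i = '^' then
    (st.1 ++ [PySem.Chars.slice st.2 none (some n)], PySem.Chars.slice st.2 (some (n + 1)) none)
  else st

-- A's second loop: t = i.find('%'); if i[t] == '%' append the pair (i[t] raises on empty i: none case is outside Pre_); dumy = dumy[1:].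
def pvStepA2 (st : List (String × String) × List (List Char)) (i : List Char) : List (String × String) × List (List Char) :=
  let t := PySem.Chars.find i ['%']
  match PySem.Chars.pyGet? i t with
  | some c =>
      if c = '%' then
        (st.1 ++ [(String.ofList (PySem.Chars.slice i none (some t)),
                   String.ofList (PySem.Chars.slice i (some (t + 1)) none))],
         PySem.List.slice st.2 (some 1) none)
      else st
  | none => st

def TableBinary_to_list (Read : String) : List (String × String) :=
  let r := PySem.Str.replace (PySem.Str.replace Read "\t" "%") "\r\n" "^"
  let cs := r.toList
  let dumy := (cs.foldl pvStepA1 ([], cs)).1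
  (dumy.foldl pvStepA2 ([], dumy)).1

-- ===== PORT B =====
-- B's single pass: on '^' finalize the buffer (append the pair if it contains '%'), else extend the buffer.
def pvStepB (st : List (String × String) × List Char) (c : Char) : List (String × String) × List Char :=
  if c = '^' then
    let k := PySem.Chars.find st.2 ['%']
    (st.1 ++ (if k ≠ -1 then
        [(String.ofList (PySem.Chars.slice st.2 none (some k)),
          String.ofList (PySem.Chars.slice st.2 (some (k + 1)) none))] else []),
     [])
  else (st.1, st.2 ++ [c])

def TableBinary_to_list_alt (Read : String) : List (String × String) :=
  let s := (PySem.Str.replace (PySem.Str.replace Read "\t" "%") "\r\n" "^").toList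
  (s.foldl pvStepB ([], [])).1

-- ===== PRECONDITION & SPEC =====
-- Pre_ excludes exactly the inputs on which the Python A raises IndexError: those whose
-- normalized form (tab->'%', CRLF->'^') starts with '^' or contains '^^' (an empty segment,
-- on which A's indexing of the empty segment's last character raises).
def Pre_TableBinary_to_list (Read : String) : Prop :=
  PySem.Str.startswith (PySem.Str.replace (PySem.Str.replace Read "\t" "%") "\r\n" "^") "^" = false ∧
  PySem.Str.isIn "^^" (PySem.Str.replace (PySem.Str.replace Read "\t" "%") "\r\n" "^") = false
instance (Read : String) : Decidable (Pre_TableBinary_to_list Read) := by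
  unfold Pre_TableBinary_to_list; infer_instance

def pvWitness_TableBinary_to_list : String := "ab\tcd\r\nx%y\r\n"

def Spec_TableBinary_to_list (Read : String) (out : List (String × String)) : Prop :=
  out = TableBinary_to_list_alt Read
instance (Read : String) (out : List (String × String)) : Decidable (Spec_TableBinary_to_list Read out) := by
  unfold Spec_TableBinary_to_list; infer_instance

-- ===== CLAIM (what is proved, stated in full; the proofs are below) =====
def Claim_equal_TableBinary_to_list : Prop :=
  ∀ (Read : String), Dom_TableBinary_to_list Read → Pre_TableBinary_to_list Read →
    Spec_TableBinary_to_list Read (TableBinary_to_list Read)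

-- ===== LEMMAS AND PROOFS =====

-- the pieces A's first loop extracts, defined by fuel = number of '^' chars consumed
def pvExtract : Nat → List Char → List (List Char) × List Char
  | 0, cur => ([], cur)
  | k + 1, cur =>
      let n := PySem.Chars.find cur ['^']
      let p := pvExtract k (PySem.Chars.slice cur (some (n + 1)) none)
      (PySem.Chars.slice cur none (some n) :: p.1, p.2)

-- finalization of one segment, A-style and B-style
def pvFinA (i : List Char) : List (String × String) :=
  let t := PySem.Chars.find i ['%']
  match PySem.Chars.pyGet? i t with
  | some c =>
      if c = '%' then
        [(String.ofList (PySem.Chars.slice i none (some t)),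
          String.ofList (PySem.Chars.slice i (some (t + 1)) none))]
      else []
  | none => []

def pvFinB (i : List Char) : List (String × String) :=
  let k := PySem.Chars.find i ['%']
  if k ≠ -1 then
    [(String.ofList (PySem.Chars.slice i none (some k)),
      String.ofList (PySem.Chars.slice i (some (k + 1)) none))]
  else []

-- B's pass written recursively
def pvBcore : List Char → List Char → List (String × String)
  | [], _ => []
  | c :: rest, buf =>
      if c = '^' then pvFinB buf ++ pvBcore rest []
      else pvBcore rest (buf ++ [c])

theorem pv_singleton_prefix {c : Char} {l : List Char} : [c] <+: l ↔ l.head? = some c := by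
  cases l with
  | nil => simp
  | cons a t =>
      constructor
      · rintro ⟨u, hu⟩; cases hu; simp
      · intro h; simp at h; exact ⟨t, by simp [h]⟩

theorem pv_find_append_cons (a b : List Char) (c : Char) (ha : c ∉ a) :
    PySem.Chars.find (a ++ c :: b) [c] = (a.length : Int) := by
  have hin : [c] <:+: (a ++ c :: b) := ⟨a, b, by simp⟩
  have h0 : 0 ≤ PySem.Chars.find (a ++ c :: b) [c] :=
    (PySem.Chars.find_nonneg_iff _ _).mpr hin
  obtain ⟨hpre, hmin⟩ := PySem.Chars.find_spec h0
  set m := (PySem.Chars.find (a ++ c :: b) [c]).toNat with hm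
  have hc : (a ++ c :: b)[m]? = some c := by
    have := pv_singleton_prefix.mp hpre
    rwa [List.head?_drop] at this
  have h1 : a.length ≤ m := by
    by_contra h
    push_neg at h
    rw [List.getElem?_append_left h] at hc
    exact ha (List.mem_of_getElem? hc)
  have h2 : m ≤ a.length := by
    by_contra h
    push_neg at h
    have hb : [c] <+: List.drop a.length (a ++ c :: b) := by
      rw [List.drop_left]; exact ⟨b, rfl⟩
    exact hmin a.length h hb
  omega

theorem pv_drop_append_cons (a b : List Char) (c : Char) :
    (a ++ c :: b).drop (a.length + 1) = b := by
  induction a with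
  | nil => simp
  | cons x t ih => simpa using ih

theorem pv_extract_step (a b : List Char) (k : Nat) (ha : '^' ∉ a) :
    pvExtract (k + 1) (a ++ '^' :: b) =
      (a :: (pvExtract k b).1, (pvExtract k b).2) := by
  have hf := pv_find_append_cons a b '^' ha
  have h1 : PySem.Chars.slice (a ++ '^' :: b) none (some (a.length : Int)) = a := by
    rw [PySem.Chars.slice_eq_listSlice, PySem.List.slice_to_natCast, List.take_left]
  have h2 : PySem.Chars.slice (a ++ '^' :: b) (some ((a.length : Int) + 1)) none = b := by
    rw [show ((a.length : Int) + 1) = ((a.length + 1 : Nat) : Int) by push_cast; ring,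
      PySem.Chars.slice_eq_listSlice, PySem.List.slice_from_natCast, pv_drop_append_cons]
  simp only [pvExtract, hf, h1, h2]

-- A's first loop is pvExtract driven by the caret count of the iterated chars
theorem pv_loop1_eq (it : List Char) : ∀ (st : List (List Char) × List Char),
    it.foldl pvStepA1 st =
      (st.1 ++ (pvExtract (it.count '^') st.2).1, (pvExtract (it.count '^') st.2).2) := by
  induction it with
  | nil => intro st; simp [pvExtract]
  | cons c rest ih =>
      intro st
      by_cases hc : c = '^'
      · subst hc
        rw [List.foldl_cons, List.count_cons_self, ih]
        simp [pvStepA1, pvExtract]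
      · rw [List.foldl_cons, List.count_cons_of_ne (by simpa using hc), ih]
        simp [pvStepA1, hc]

theorem pvStepA2_fst (st : List (String × String) × List (List Char)) (i : List Char) :
    (pvStepA2 st i).1 = st.1 ++ pvFinA i := by
  simp only [pvStepA2, pvFinA]
  cases h : PySem.Chars.pyGet? i (PySem.Chars.find i ['%']) with
  | none => simp
  | some c => by_cases hc : c = '%' <;> simp [hc]

-- A's second loop is a flatMap of pvFinA (the dead dumy-slicing state does not matter)
theorem pv_loop2_eq (l : List (List Char)) : ∀ (st : List (String × String) × List (List Char)),
    (l.foldl pvStepA2 st).1 = st.1 ++ l.flatMap pvFinA := by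
  induction l with
  | nil => intro st; simp
  | cons i rest ih =>
      intro st
      rw [List.foldl_cons, ih, pvStepA2_fst]
      simp

-- B's fold is pvBcore
theorem pv_loopB_eq (it : List Char) : ∀ (st : List (String × String) × List Char),
    (it.foldl pvStepB st).1 = st.1 ++ pvBcore it st.2 := by
  induction it with
  | nil => intro st; simp [pvBcore]
  | cons c rest ih =>
      intro st
      by_cases hc : c = '^'
      · subst hc
        rw [List.foldl_cons, ih]
        simp [pvStepB, pvBcore, pvFinB]
      · rw [List.foldl_cons, ih]
        simp [pvStepB, pvBcore, if_neg hc]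

-- the two finalizations agree on every segment (the empty segment is skipped by both ports)
theorem pv_fin_eq (i : List Char) : pvFinA i = pvFinB i := by
  simp only [pvFinA, pvFinB]
  by_cases h : [ '%' ] <:+: i
  · have h0 : 0 ≤ PySem.Chars.find i ['%'] := (PySem.Chars.find_nonneg_iff _ _).mpr h
    obtain ⟨hpre, _⟩ := PySem.Chars.find_spec h0
    have hget : PySem.List.pyGet? i (PySem.Chars.find i ['%']) = some '%' := by
      rw [PySem.List.pyGet?_of_nonneg _ h0]
      have := pv_singleton_prefix.mp hpre
      rwa [List.head?_drop] at this
    have hne : PySem.Chars.find i ['%'] ≠ -1 := by omega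
    simp [hget, hne]
  · have hm : PySem.Chars.find i ['%'] = -1 := (PySem.Chars.find_eq_neg_one_iff _ _).mpr h
    have hmem : '%' ∉ i := by
      intro hx
      obtain ⟨s, t, hst⟩ := List.append_of_mem hx
      exact h ⟨s, t, by simp [hst]⟩
    have hg : PySem.Chars.pyGet? i (-1) = i.getLast? := by
      rw [PySem.Chars.pyGet?_eq_listPyGet?, PySem.List.pyGet?_neg_one]
    simp only [hm, hg]
    cases hl : i.getLast? with
    | none => simp
    | some c =>
        have hc : c ≠ '%' := fun hcc => hmem (hcc ▸ List.mem_of_getLast? hl)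
        simp [hc]

-- the crux: A's flatMap over the extracted segments equals B's single pass
theorem pv_main (cs : List Char) : ∀ (buf : List Char), '^' ∉ buf →
    ((pvExtract (cs.count '^') (buf ++ cs)).1).flatMap pvFinA = pvBcore cs buf := by
  induction cs with
  | nil => intro buf _; simp [pvExtract, pvBcore]
  | cons c rest ih =>
      intro buf hbuf
      by_cases hc : c = '^'
      · subst hc
        rw [List.count_cons_self, pv_extract_step buf rest _ hbuf]
        have h2 := ih [] (by simp)
        simp only [List.nil_append] at h2
        simp [pvBcore, pv_fin_eq, h2]
      · rw [List.count_cons_of_ne (by simpa using hc),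
          show buf ++ c :: rest = (buf ++ [c]) ++ rest by simp,
          ih (buf ++ [c]) (by
            intro hx
            rcases List.mem_append.mp hx with h | h
            · exact hbuf h
            · simp at h; exact hc h.symm)]
        simp [pvBcore, if_neg hc]

-- ===== VERDICT (by name: the statement is the Claim_ definition above) =====
set_option maxHeartbeats 1000000 in
theorem TableBinary_to_list_spec : Claim_equal_TableBinary_to_list := by
  unfold Claim_equal_TableBinary_to_list
  intro Read _ _
  simp only [Spec_TableBinary_to_list, TableBinary_to_list, TableBinary_to_list_alt]
  rw [pv_loop1_eq, pv_loop2_eq, pv_loopB_eq]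
  simp only [List.nil_append]
  have h := pv_main ((PySem.Str.replace (PySem.Str.replace Read "\t" "%") "\r\n" "^").toList) [] (List.not_mem_nil)
  rw [List.nil_append] at h
  exact h
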